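-- pv_equiv track=rewrite | github.com/DroneWuKong/droneclear_Forge | build_static.py | rewrite_legacy_domains
-- ===== SOURCE A (Python) =====
-- def rewrite_legacy_domains(html):
--     """Rewrite all occurrences of legacy nvmill*/illdoitmyself domains
--     to their new uas-* equivalents. Runs at build time so the source HTML
--     files can be left unchanged — a pragmatic mass-replace that catches
--     hardcoded URLs embedded in any of the ~20 page templates.
--
--     Pro paths (/patterns/, /pro/) route to uas-patterns.pro.
--     All other Forge paths route to uas-forge.com.
--     All other Patterns paths route to uas-patterns.com.
--     Handbook references route to uas-handbook.com.
--
--     Order matters: specific-path rules must run before bare-domain rules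
--     so e.g. nvmillbuilditmyself.com/pro/ → uas-patterns.pro/pro/ wins
--     over the generic nvmillbuilditmyself.com → uas-forge.com.
--     """
--     # Pro-specific paths (must come first — more specific than bare domain)
--     specific = [
--         ('https://nvmillbuilditmyself.com/patterns/', 'https://uas-patterns.pro/patterns/'),
--         ('https://nvmillbuilditmyself.com/pro/',      'https://uas-patterns.pro/pro/'),
--         ('https://nvmillfindoutmyself.com/patterns/', 'https://uas-patterns.pro/patterns/'),
--         ('https://nvmillfindoutmyself.com/pro/',      'https://uas-patterns.pro/pro/'),
--     ]
--     for old, new in specific: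
--         html = html.replace(old, new)
--
--     # Bare-domain replacements (catch-all for everything else)
--     bare = [
--         ('https://www.nvmillbuilditmyself.com', 'https://uas-forge.com'),
--         ('https://nvmillbuilditmyself.com',     'https://uas-forge.com'),
--         ('https://www.nvmillfindoutmyself.com', 'https://uas-patterns.com'),
--         ('https://nvmillfindoutmyself.com',     'https://uas-patterns.com'),
--         ('https://www.nvmilldoitmyself.com',    'https://uas-handbook.com'),
--         ('https://nvmilldoitmyself.com',        'https://uas-handbook.com'),
--         ('https://www.illdoitmyself.com',       'https://uas-handbook.com'),
--         ('https://illdoitmyself.com',           'https://uas-handbook.com'),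
--     ]
--     for old, new in bare:
--         html = html.replace(old, new)
--
--     return html
-- ===== SOURCE B (Python) =====
-- import re
--
-- # One ordered (old, new) mapping: the four specific-path rules first, then the
-- # eight bare-domain rules -- the same priority order A's sequential replaces
-- # realise.  A single compiled alternation rewrites everything in one
-- # left-to-right pass (re alternation picks the FIRST listed alternative at a
-- # position, so the specific rules win over the bare-domain prefixes; every
-- # replacement starts with 'https://uas-', which no source pattern can match,
-- # so one pass reproduces the sequential-replace result exactly).
-- _MAPPING = [
--     ('https://nvmillbuilditmyself.com/patterns/', 'https://uas-patterns.pro/patterns/'),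
--     ('https://nvmillbuilditmyself.com/pro/',      'https://uas-patterns.pro/pro/'),
--     ('https://nvmillfindoutmyself.com/patterns/', 'https://uas-patterns.pro/patterns/'),
--     ('https://nvmillfindoutmyself.com/pro/',      'https://uas-patterns.pro/pro/'),
--     ('https://www.nvmillbuilditmyself.com', 'https://uas-forge.com'),
--     ('https://nvmillbuilditmyself.com',     'https://uas-forge.com'),
--     ('https://www.nvmillfindoutmyself.com', 'https://uas-patterns.com'),
--     ('https://nvmillfindoutmyself.com',     'https://uas-patterns.com'),
--     ('https://www.nvmilldoitmyself.com',    'https://uas-handbook.com'),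
--     ('https://nvmilldoitmyself.com',        'https://uas-handbook.com'),
--     ('https://www.illdoitmyself.com',       'https://uas-handbook.com'),
--     ('https://illdoitmyself.com',           'https://uas-handbook.com'),
-- ]
-- _LOOKUP = dict(_MAPPING)
-- _PATTERN = re.compile('|'.join(re.escape(old) for old, _ in _MAPPING))
--
--
-- def rewrite_legacy_domains(html):
--     """Single-pass rewrite of all legacy domain URLs to their uas-* equivalents."""
--     return _PATTERN.sub(lambda m: _LOOKUP[m.group(0)], html)
-- ===== Notes on version B (the rewrite author's own statement) =====
-- stated objective: idiomatic
-- what changed: Replaces twelve sequential full-string str.replace passes by one ordered mapping plus a single compiled regex alternation that rewrites the whole document in one left-to-right pass (first-match priority reproduces A's specific-before-bare ordering).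
import Mathlib
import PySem

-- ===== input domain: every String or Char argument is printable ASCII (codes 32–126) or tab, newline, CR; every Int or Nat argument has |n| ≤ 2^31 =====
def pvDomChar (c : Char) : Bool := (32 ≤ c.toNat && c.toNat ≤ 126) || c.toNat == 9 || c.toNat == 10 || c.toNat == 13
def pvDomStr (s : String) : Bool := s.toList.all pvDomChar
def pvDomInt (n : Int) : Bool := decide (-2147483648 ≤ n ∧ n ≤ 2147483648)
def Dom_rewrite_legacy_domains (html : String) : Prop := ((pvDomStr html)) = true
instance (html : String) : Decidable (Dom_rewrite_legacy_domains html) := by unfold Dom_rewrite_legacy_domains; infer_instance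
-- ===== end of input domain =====

-- B replaces A's twelve sequential full-string replace passes by one ordered
-- rule table applied in a single left-to-right first-match pass (idiomatic
-- single regex-substitution); equal return value on every input.

-- ===== PORT A =====
-- the 'specific' list of A
def pvSpecificA : List (String × String) :=
  [("https://nvmillbuilditmyself.com/patterns/", "https://uas-patterns.pro/patterns/"),
   ("https://nvmillbuilditmyself.com/pro/",      "https://uas-patterns.pro/pro/"),
   ("https://nvmillfindoutmyself.com/patterns/", "https://uas-patterns.pro/patterns/"),
   ("https://nvmillfindoutmyself.com/pro/",      "https://uas-patterns.pro/pro/")]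

-- the 'bare' list of A
def pvBareA : List (String × String) :=
  [("https://www.nvmillbuilditmyself.com", "https://uas-forge.com"),
   ("https://nvmillbuilditmyself.com",     "https://uas-forge.com"),
   ("https://www.nvmillfindoutmyself.com", "https://uas-patterns.com"),
   ("https://nvmillfindoutmyself.com",     "https://uas-patterns.com"),
   ("https://www.nvmilldoitmyself.com",    "https://uas-handbook.com"),
   ("https://nvmilldoitmyself.com",        "https://uas-handbook.com"),
   ("https://www.illdoitmyself.com",       "https://uas-handbook.com"),
   ("https://illdoitmyself.com",           "https://uas-handbook.com")]

-- A: for old, new in specific: html = html.replace(old, new); then the same over bare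
def rewrite_legacy_domains (html : String) : String :=
  let h1 := pvSpecificA.foldl (fun h p => PySem.Str.replace h p.1 p.2) html
  pvBareA.foldl (fun h p => PySem.Str.replace h p.1 p.2) h1

-- ===== PORT B =====
-- Source B's _MAPPING: the four specific-path rules first, then the eight bare-domain rules
def pvMapping : List (String × String) :=
  [("https://nvmillbuilditmyself.com/patterns/", "https://uas-patterns.pro/patterns/"),
   ("https://nvmillbuilditmyself.com/pro/",      "https://uas-patterns.pro/pro/"),
   ("https://nvmillfindoutmyself.com/patterns/", "https://uas-patterns.pro/patterns/"),
   ("https://nvmillfindoutmyself.com/pro/",      "https://uas-patterns.pro/pro/"),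
   ("https://www.nvmillbuilditmyself.com", "https://uas-forge.com"),
   ("https://nvmillbuilditmyself.com",     "https://uas-forge.com"),
   ("https://www.nvmillfindoutmyself.com", "https://uas-patterns.com"),
   ("https://nvmillfindoutmyself.com",     "https://uas-patterns.com"),
   ("https://www.nvmilldoitmyself.com",    "https://uas-handbook.com"),
   ("https://nvmilldoitmyself.com",        "https://uas-handbook.com"),
   ("https://www.illdoitmyself.com",       "https://uas-handbook.com"),
   ("https://illdoitmyself.com",           "https://uas-handbook.com")]

def pvRulesC : List (List Char × List Char) :=
  pvMapping.map (fun p => (p.1.toList, p.2.toList))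

-- the semantics of Source B's single re.sub over the literal alternation (re alternation
-- matches the FIRST listed alternative at each position, scanning left to right):
-- at each position try the rules in order; on a match emit the replacement and skip
-- the matched text, otherwise copy the character.  Exact for literal patterns.
def pvScan (rules : List (List Char × List Char)) : List Char → List Char
  | [] => []
  | c :: t =>
    match rules.find? (fun r => r.1.isPrefixOf (c :: t)) with
    | some r => r.2 ++ pvScan rules (t.drop (r.1.length - 1))
    | none => c :: pvScan rules t
  termination_by l => l.length
  decreasing_by
  · simp only [List.length_cons]; exact Nat.lt_succ_of_le (by rw [List.length_drop]; omega)
  · simp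

def rewrite_legacy_domains_alt (html : String) : String :=
  String.ofList (pvScan pvRulesC html.toList)

-- ===== PRECONDITION & SPEC =====
def Spec_rewrite_legacy_domains (html : String) (out : String) : Prop := out = rewrite_legacy_domains_alt html
instance (html : String) (out : String) : Decidable (Spec_rewrite_legacy_domains html out) := by unfold Spec_rewrite_legacy_domains; infer_instance

-- ===== CLAIM (what is proved, stated in full; the proofs are below) =====
def Claim_equal_rewrite_legacy_domains : Prop := ∀ (html : String), Dom_rewrite_legacy_domains html → Spec_rewrite_legacy_domains html (rewrite_legacy_domains html)

-- ===== LEMMAS AND PROOFS =====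

-- "http": every source pattern starts with it, and neither a source pattern nor a
-- replacement contains it other than as a prefix — the anchor of the whole proof.
def pvHttp : List Char := ['h', 't', 't', 'p']

def pvIncomp (a b : List Char) : Bool := !(a.isPrefixOf b) && !(b.isPrefixOf a)

-- every nonempty proper suffix of w is prefix-incomparable with "http"
def pvSfxOK (w : List Char) : Bool :=
  (w.tails.drop 1).all fun q => q.isEmpty || pvIncomp q pvHttp

-- every nonempty suffix of w is prefix-incomparable with n
def pvHbOK (w n : List Char) : Bool :=
  w.tails.all fun q => q.isEmpty || pvIncomp q n

-- decidable side conditions of the rule table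
theorem pvFactRules : ∀ r ∈ pvRulesC,
    r.1 ≠ [] ∧ pvHttp <+: r.1 ∧ pvSfxOK r.1 = true ∧ pvSfxOK r.2 = true := by decide

theorem pvFactPairs : ∀ r ∈ pvRulesC, ∀ r' ∈ pvRulesC,
    pvHbOK r'.1 r.2 = true ∧ pvIncomp r'.1 r.2 = true := by decide

-- pvRep o n s: Python's s.replace(o, n) for nonempty o, in recursion-friendly form
def pvRep (o n : List Char) : List Char → List Char
  | [] => []
  | c :: t =>
    if o.isPrefixOf (c :: t) then n ++ pvRep o n (t.drop (o.length - 1))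
    else c :: pvRep o n t
  termination_by l => l.length
  decreasing_by
  · simp only [List.length_cons]; exact Nat.lt_succ_of_le (by rw [List.length_drop]; omega)
  · simp

-- A's sequence of replaces as a fold
def pvFL (rs : List (List Char × List Char)) (s : List Char) : List Char :=
  rs.foldl (fun h r => pvRep r.1 r.2 h) s

theorem pvRep_nil (o n : List Char) : pvRep o n [] = [] := by simp [pvRep]

theorem pvRep_pos (o n : List Char) (c : Char) (t : List Char)
    (h : o.isPrefixOf (c :: t) = true) :
    pvRep o n (c :: t) = n ++ pvRep o n (t.drop (o.length - 1)) := by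
  rw [pvRep]; simp [h]

theorem pvRep_neg (o n : List Char) (c : Char) (t : List Char)
    (h : ¬ o.isPrefixOf (c :: t) = true) :
    pvRep o n (c :: t) = c :: pvRep o n t := by
  rw [pvRep]; simp [h]

theorem pvRep_head (o n X : List Char) (ho : o ≠ []) :
    pvRep o n (o ++ X) = n ++ pvRep o n X := by
  cases o with
  | nil => exact absurd rfl ho
  | cons a o' =>
    rw [List.cons_append, pvRep_pos _ _ _ _ (by simp [List.isPrefixOf_iff_prefix])]
    simp

theorem pvGo (o n : List Char) (ho : o ≠ []) :
    ∀ fuel l acc, l.length ≤ fuel →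
      PySem.Chars.replace.go o n fuel l acc = acc.reverse ++ pvRep o n l := by
  intro fuel
  induction fuel with
  | zero =>
    intro l acc hl
    have : l = [] := List.eq_nil_of_length_eq_zero (Nat.le_zero.mp hl)
    subst this
    simp [PySem.Chars.replace.go, pvRep_nil]
  | succ N ih =>
    intro l acc hl
    cases l with
    | nil => simp [PySem.Chars.replace.go, pvRep_nil]
    | cons c t =>
      rw [PySem.Chars.replace.go]
      by_cases hp : o.isPrefixOf (c :: t) = true
      · simp only [hp, if_pos]
        rw [ih]
        · rw [pvRep_pos _ _ _ _ hp]
          cases o with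
          | nil => exact absurd rfl ho
          | cons a o' => simp [List.drop_succ_cons]
        · calc (List.drop o.length (c :: t)).length ≤ t.length := by
                cases o with
                | nil => exact absurd rfl ho
                | cons a o' =>
                    simp only [List.length_cons, List.drop_succ_cons]
                    rw [List.length_drop]; omega
             _ ≤ N := Nat.le_of_succ_le_succ (by simpa using hl)
      · simp only [hp, if_neg, Bool.false_eq_true, not_false_eq_true]
        rw [ih _ _ (Nat.le_of_succ_le_succ (by simpa using hl))]
        rw [pvRep_neg _ _ _ _ hp]
        simp

theorem pvReplace_eq (o n s : List Char) (ho : o ≠ []) :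
    PySem.Chars.replace s o n = pvRep o n s := by
  rw [PySem.Chars.replace]
  have : o.isEmpty = false := by cases o with
    | nil => exact absurd rfl ho
    | cons a o' => rfl
  rw [this]
  simpa using pvGo o n ho s.length s [] (le_refl _)

theorem pvPrefixAppendCases {q n z : List Char} (h : q <+: n ++ z) :
    q <+: n ∨ n <+: q :=
  List.prefix_or_prefix_of_prefix h (List.prefix_append n z)

theorem pvHb_elim {w n q : List Char} (h : pvHbOK w n = true) (hq : q <:+ w)
    (hne : q ≠ []) : ¬ q <+: n ∧ ¬ n <+: q := by
  have hm : q ∈ w.tails := (List.mem_tails _ _).mpr hq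
  have := (List.all_eq_true.mp h) q hm
  simp only [pvIncomp, List.isEmpty_iff, Bool.or_eq_true, Bool.and_eq_true,
    Bool.not_eq_true'] at this
  rcases this with h1 | ⟨h2, h3⟩
  · exact absurd h1 hne
  · exact ⟨by simp [← List.isPrefixOf_iff_prefix, h2],
           by simp [← List.isPrefixOf_iff_prefix, h3]⟩

theorem pvSfx_elim {w q : List Char} (h : pvSfxOK w = true) (hq : q <:+ w.tail)
    (hne : q ≠ []) : ¬ q <+: pvHttp ∧ ¬ pvHttp <+: q := by
  cases w with
  | nil => simp at hq; exact absurd hq hne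
  | cons a w' =>
    have hm : q ∈ ((a :: w').tails.drop 1) := by
      simpa [List.tails] using (List.mem_tails _ _).mpr hq
    have := (List.all_eq_true.mp h) q hm
    simp only [pvIncomp, List.isEmpty_iff, Bool.or_eq_true, Bool.and_eq_true,
      Bool.not_eq_true'] at this
    rcases this with h1 | ⟨h2, h3⟩
    · exact absurd h1 hne
    · exact ⟨by simp [← List.isPrefixOf_iff_prefix, h2],
             by simp [← List.isPrefixOf_iff_prefix, h3]⟩

-- preservation: replacing (o → n) inside x cannot create a new prefix occurrence of
-- any suffix q of a pattern w (all such q are prefix-incomparable with n)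
theorem pvRep_pres (o n w : List Char) (hw : pvHbOK w n = true) :
    ∀ N x, x.length ≤ N → ∀ q, q <:+ w → q <+: pvRep o n x → q <+: x := by
  intro N
  induction N with
  | zero =>
    intro x hx q _ hpre
    have : x = [] := List.eq_nil_of_length_eq_zero (Nat.le_zero.mp hx)
    subst this
    simpa [pvRep_nil] using hpre
  | succ N ih =>
    intro x hx q hq hpre
    cases x with
    | nil => simpa [pvRep_nil] using hpre
    | cons c t =>
      by_cases hp : o.isPrefixOf (c :: t) = true
      · rw [pvRep_pos _ _ _ _ hp] at hpre
        cases q with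
        | nil => exact List.nil_prefix
        | cons d q' =>
          rcases pvPrefixAppendCases hpre with h1 | h2
          · exact absurd h1 (pvHb_elim hw hq (by simp)).1
          · exact absurd h2 (pvHb_elim hw hq (by simp)).2
      · rw [pvRep_neg _ _ _ _ hp] at hpre
        cases q with
        | nil => exact List.nil_prefix
        | cons d q' =>
          rw [List.cons_prefix_cons] at hpre
          obtain ⟨rfl, hq'⟩ := hpre
          have hq'w : q' <:+ w := (List.suffix_cons d q').trans hq
          have := ih t (Nat.le_of_succ_le_succ (by simpa using hx)) q' hq'w hq'
          rw [List.cons_prefix_cons]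
          exact ⟨rfl, this⟩

-- splitting: if o never matches at a position inside w (guaranteed by the "http"
-- anchor discipline of w), replace distributes over w ++ z
theorem pvRep_split (o n : List Char) (ho : pvHttp <+: o) :
    ∀ w, pvSfxOK w = true → ∀ z, ¬ o <+: (w ++ z) →
      pvRep o n (w ++ z) = w ++ pvRep o n z := by
  intro w
  induction w with
  | nil => intro _ z _; simp
  | cons a w' ih =>
    intro hw z h0
    have hnp : ¬ o.isPrefixOf (a :: (w' ++ z)) = true := by
      rw [List.isPrefixOf_iff_prefix]
      simpa using h0
    rw [List.cons_append, pvRep_neg _ _ _ _ hnp]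
    by_cases hw0 : w' = []
    · subst hw0; simp
    · have hw' : pvSfxOK w' = true := by
        -- pvSfxOK (a :: w') says all of (tails w') satisfy P; pvSfxOK w' needs (tails w').drop 1
        have : ((a :: w').tails.drop 1).all
            (fun q => q.isEmpty || pvIncomp q pvHttp) = true := hw
        simp only [List.tails, List.drop_succ_cons, List.drop_zero] at this
        apply List.all_eq_true.mpr
        intro q hq
        exact (List.all_eq_true.mp this) q (List.mem_of_mem_drop hq)
      have h0' : ¬ o <+: w' ++ z := by
        intro hoz
        have hsfx : w' <:+ (a :: w').tail := by simp
        rcases pvPrefixAppendCases hoz with h1 | h2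
        · exact (pvSfx_elim hw hsfx hw0).2 (ho.trans h1)
        · rcases List.prefix_or_prefix_of_prefix h2 ho with h3 | h4
          · exact (pvSfx_elim hw hsfx hw0).1 h3
          · exact (pvSfx_elim hw hsfx hw0).2 h4
      rw [ih hw' z h0', List.cons_append]

theorem pvFL_nil (rs : List (List Char × List Char)) : pvFL rs [] = [] := by
  induction rs with
  | nil => rfl
  | cons r rs' ih => simpa [pvFL, List.foldl_cons, pvRep_nil] using ih

theorem pvFL_cons (rs : List (List Char × List Char))
    (hOK : ∀ r ∈ rs, ∀ r' ∈ rs, pvHbOK r'.1 r.2 = true) (c : Char) (t : List Char)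
    (h : ∀ r ∈ rs, ¬ r.1 <+: (c :: t)) :
    pvFL rs (c :: t) = c :: pvFL rs t := by
  induction rs generalizing t with
  | nil => rfl
  | cons r rs' ih =>
    have hnp : ¬ r.1.isPrefixOf (c :: t) = true := by
      rw [List.isPrefixOf_iff_prefix]
      exact h r (by simp)
    have hstep : pvRep r.1 r.2 (c :: t) = c :: pvRep r.1 r.2 t :=
      pvRep_neg _ _ _ _ hnp
    have h' : ∀ r' ∈ rs', ¬ r'.1 <+: (c :: pvRep r.1 r.2 t) := by
      intro r' hr' hcon
      cases hq : r'.1 with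
      | nil =>
        exact h r' (by simp [hr']) (by simp [hq])
      | cons d q' =>
        rw [hq, List.cons_prefix_cons] at hcon
        obtain ⟨rfl, hq'⟩ := hcon
        have : q' <:+ r'.1 := by rw [hq]; exact List.suffix_cons d q'
        have := pvRep_pres r.1 r.2 r'.1
          (hOK r (by simp) r' (by simp [hr'])) t.length t (le_refl _) q' this hq'
        exact h r' (by simp [hr']) (by rw [hq, List.cons_prefix_cons]; exact ⟨rfl, this⟩)
    calc pvFL (r :: rs') (c :: t) = pvFL rs' (pvRep r.1 r.2 (c :: t)) := by
            simp [pvFL, List.foldl_cons]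
      _ = pvFL rs' (c :: pvRep r.1 r.2 t) := by rw [hstep]
      _ = c :: pvFL rs' (pvRep r.1 r.2 t) :=
            ih (fun r hr r' hr' => hOK r (by simp [hr]) r' (by simp [hr'])) _ h'
      _ = c :: pvFL (r :: rs') t := by simp [pvFL, List.foldl_cons]

theorem pvFL_pre (rs : List (List Char × List Char)) (w : List Char)
    (hw : pvSfxOK w = true) (hhttp : ∀ r ∈ rs, pvHttp <+: r.1)
    (hOK : ∀ r ∈ rs, ∀ r' ∈ rs, pvHbOK r'.1 r.2 = true) :
    ∀ X, (∀ r ∈ rs, ¬ r.1 <+: w ++ X) → pvFL rs (w ++ X) = w ++ pvFL rs X := by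
  induction rs with
  | nil => intro X _; rfl
  | cons r rs' ih =>
    intro X h
    have hstep : pvRep r.1 r.2 (w ++ X) = w ++ pvRep r.1 r.2 X :=
      pvRep_split r.1 r.2 (hhttp r (by simp)) w hw X (h r (by simp))
    have h' : ∀ r' ∈ rs', ¬ r'.1 <+: w ++ pvRep r.1 r.2 X := by
      intro r' hr' hcon
      rcases pvPrefixAppendCases hcon with h1 | h2
      · exact h r' (by simp [hr']) (h1.trans (List.prefix_append w X))
      · obtain ⟨d, hd⟩ := h2
        rw [← hd, List.prefix_append_right_inj] at hcon
        have hdsf : d <:+ r'.1 := by rw [← hd]; exact List.suffix_append w d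
        have := pvRep_pres r.1 r.2 r'.1
          (hOK r (by simp) r' (by simp [hr'])) X.length X (le_refl _) d hdsf hcon
        exact h r' (by simp [hr'])
          (by rw [← hd]; exact (List.prefix_append_right_inj w).mpr this)
    calc pvFL (r :: rs') (w ++ X) = pvFL rs' (w ++ pvRep r.1 r.2 X) := by
            simp [pvFL, List.foldl_cons, hstep]
      _ = w ++ pvFL rs' (pvRep r.1 r.2 X) :=
            ih (fun r hr => hhttp r (by simp [hr]))
               (fun r hr r' hr' => hOK r (by simp [hr]) r' (by simp [hr'])) _ h'
      _ = w ++ pvFL (r :: rs') X := by simp [pvFL, List.foldl_cons]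

theorem pvFL_post (rs : List (List Char × List Char)) (w : List Char)
    (hw : pvSfxOK w = true) (hhttp : ∀ r ∈ rs, pvHttp <+: r.1)
    (hinc : ∀ r ∈ rs, ¬ r.1 <+: w ∧ ¬ w <+: r.1) :
    ∀ X, pvFL rs (w ++ X) = w ++ pvFL rs X := by
  induction rs with
  | nil => intro X; rfl
  | cons r rs' ih =>
    intro X
    have h0 : ¬ r.1 <+: w ++ X := by
      intro hcon
      rcases pvPrefixAppendCases hcon with h1 | h2
      · exact (hinc r (by simp)).1 h1
      · exact (hinc r (by simp)).2 h2
    have hstep : pvRep r.1 r.2 (w ++ X) = w ++ pvRep r.1 r.2 X :=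
      pvRep_split r.1 r.2 (hhttp r (by simp)) w hw X h0
    calc pvFL (r :: rs') (w ++ X) = pvFL rs' (w ++ pvRep r.1 r.2 X) := by
            simp [pvFL, List.foldl_cons, hstep]
      _ = w ++ pvFL rs' (pvRep r.1 r.2 X) :=
            ih (fun r hr => hhttp r (by simp [hr]))
               (fun r hr => hinc r (by simp [hr])) _
      _ = w ++ pvFL (r :: rs') X := by simp [pvFL, List.foldl_cons]

theorem pvScan_nil (rs : List (List Char × List Char)) : pvScan rs [] = [] := by
  simp [pvScan]

theorem pvScan_cons_some (rs : List (List Char × List Char)) (c : Char)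
    (t : List Char) (r : List Char × List Char)
    (hf : rs.find? (fun r => r.1.isPrefixOf (c :: t)) = some r) :
    pvScan rs (c :: t) = r.2 ++ pvScan rs (t.drop (r.1.length - 1)) := by
  rw [pvScan, hf]

theorem pvScan_cons_none (rs : List (List Char × List Char)) (c : Char)
    (t : List Char)
    (hf : rs.find? (fun r => r.1.isPrefixOf (c :: t)) = none) :
    pvScan rs (c :: t) = c :: pvScan rs t := by
  rw [pvScan, hf]

theorem pvMaster : ∀ N s, s.length ≤ N → pvFL pvRulesC s = pvScan pvRulesC s := by
  intro N
  induction N with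
  | zero =>
    intro s hs
    have : s = [] := List.eq_nil_of_length_eq_zero (Nat.le_zero.mp hs)
    subst this
    rw [pvFL_nil, pvScan_nil]
  | succ N ih =>
    intro s hs
    cases s with
    | nil => rw [pvFL_nil, pvScan_nil]
    | cons c t =>
      cases hf : pvRulesC.find? (fun r => r.1.isPrefixOf (c :: t)) with
      | none =>
        have hno : ∀ r ∈ pvRulesC, ¬ r.1 <+: (c :: t) := by
          intro r hr
          have := List.find?_eq_none.mp hf r hr
          rw [List.isPrefixOf_iff_prefix] at this
          simpa using this
        rw [pvScan_cons_none _ _ _ hf,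
            pvFL_cons _ (fun r hr r' hr' => (pvFactPairs r hr r' hr').1) c t hno,
            ih t (Nat.le_of_succ_le_succ (by simpa using hs))]
      | some r =>
        obtain ⟨hpr, pre, post, hdec, hpre0⟩ := List.find?_eq_some_iff_append.mp hf
        have hrmem : r ∈ pvRulesC := by rw [hdec]; simp
        obtain ⟨hrne, hrhttp, hrsfx1, hrsfx2⟩ := pvFactRules r hrmem
        have ho : r.1 <+: (c :: t) := List.isPrefixOf_iff_prefix.mp hpr
        set u := t.drop (r.1.length - 1) with hu
        have hsu : (c :: t) = r.1 ++ u := by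
          obtain ⟨z, hz⟩ := ho
          have hz' : z = u := by
            have : (r.1 ++ z).drop r.1.length = (c :: t).drop r.1.length := by rw [hz]
            rw [List.drop_left] at this
            rw [this, hu]
            cases hr1 : r.1 with
            | nil => exact absurd hr1 hrne
            | cons a o' => simp [List.drop_succ_cons]
          rw [← hz, hz']
        have hulen : u.length ≤ N := by
          rw [hu]
          calc (t.drop (r.1.length - 1)).length ≤ t.length := by
                rw [List.length_drop]; omega
            _ ≤ N := Nat.le_of_succ_le_succ (by simpa using hs)
        have hpreS : ∀ b ∈ pre, ¬ b.1 <+: r.1 ++ u := by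
          intro b hb
          have := hpre0 b hb
          simp only [Bool.not_eq_eq_eq_not, Bool.not_true] at this
          rw [← hsu]
          intro hcon
          rw [← List.isPrefixOf_iff_prefix] at hcon
          rw [this] at hcon
          exact Bool.false_ne_true hcon
        have hmemPre : ∀ b ∈ pre, b ∈ pvRulesC := by
          intro b hb; rw [hdec]; simp [hb]
        have hmemPost : ∀ b ∈ post, b ∈ pvRulesC := by
          intro b hb; rw [hdec]; simp [hb]
        -- decompose the fold
        have hFL : ∀ v, pvFL pvRulesC v = pvFL post (pvRep r.1 r.2 (pvFL pre v)) := by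
          intro v
          rw [hdec]
          simp [pvFL, List.foldl_append, List.foldl_cons]
        have step1 : pvFL pre (r.1 ++ u) = r.1 ++ pvFL pre u :=
          pvFL_pre pre r.1 hrsfx1
            (fun b hb => (pvFactRules b (hmemPre b hb)).2.1)
            (fun b hb b' hb' => (pvFactPairs b (hmemPre b hb) b' (hmemPre b' hb')).1)
            u hpreS
        have step2 : pvRep r.1 r.2 (r.1 ++ pvFL pre u) = r.2 ++ pvRep r.1 r.2 (pvFL pre u) :=
          pvRep_head _ _ _ hrne
        have step3 : pvFL post (r.2 ++ pvRep r.1 r.2 (pvFL pre u))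
            = r.2 ++ pvFL post (pvRep r.1 r.2 (pvFL pre u)) :=
          pvFL_post post r.2 hrsfx2
            (fun b hb => (pvFactRules b (hmemPost b hb)).2.1)
            (fun b hb => by
              have := (pvFactPairs r hrmem b (hmemPost b hb)).2
              simp only [pvIncomp, Bool.and_eq_true, Bool.not_eq_true'] at this
              exact ⟨by simp [← List.isPrefixOf_iff_prefix, this.1],
                     by simp [← List.isPrefixOf_iff_prefix, this.2]⟩) _
        calc pvFL pvRulesC (c :: t)
            = pvFL post (pvRep r.1 r.2 (pvFL pre (r.1 ++ u))) := by rw [hFL, hsu]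
          _ = r.2 ++ pvFL post (pvRep r.1 r.2 (pvFL pre u)) := by
                rw [step1, step2, step3]
          _ = r.2 ++ pvFL pvRulesC u := by rw [hFL u]
          _ = r.2 ++ pvScan pvRulesC u := by rw [ih u hulen]
          _ = pvScan pvRulesC (c :: t) := (pvScan_cons_some _ _ _ _ hf).symm

theorem pvFLS_toList (rs : List (String × String))
    (h : ∀ r ∈ rs, r.1.toList ≠ []) (s : String) :
    (rs.foldl (fun h p => PySem.Str.replace h p.1 p.2) s).toList
      = pvFL (rs.map (fun p => (p.1.toList, p.2.toList))) s.toList := by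
  induction rs generalizing s with
  | nil => rfl
  | cons r rs' ih =>
    calc ((r :: rs').foldl (fun h p => PySem.Str.replace h p.1 p.2) s).toList
        = (rs'.foldl (fun h p => PySem.Str.replace h p.1 p.2)
            (PySem.Str.replace s r.1 r.2)).toList := by rw [List.foldl_cons]
      _ = pvFL (rs'.map (fun p => (p.1.toList, p.2.toList)))
            (PySem.Str.replace s r.1 r.2).toList :=
          ih (fun b hb => h b (by simp [hb])) _
      _ = pvFL (rs'.map (fun p => (p.1.toList, p.2.toList)))
            (pvRep r.1.toList r.2.toList s.toList) := by
          rw [PySem.Str.toList_replace, pvReplace_eq _ _ _ (h r (by simp))]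
      _ = pvFL ((r :: rs').map (fun p => (p.1.toList, p.2.toList))) s.toList := by
          simp [pvFL, List.foldl_cons]

theorem pvPortA_toList (html : String) :
    (rewrite_legacy_domains html).toList = pvFL pvRulesC html.toList := by
  have hsplit : rewrite_legacy_domains html
      = (pvSpecificA ++ pvBareA).foldl (fun h p => PySem.Str.replace h p.1 p.2) html := by
    rw [rewrite_legacy_domains, List.foldl_append]
  have hmap : (pvSpecificA ++ pvBareA).map (fun p => (p.1.toList, p.2.toList)) = pvRulesC := by
    decide
  rw [hsplit, pvFLS_toList _ (by decide) html, hmap]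

-- ===== VERDICT (by name: the statement is the Claim_ definition above) =====
theorem rewrite_legacy_domains_spec : Claim_equal_rewrite_legacy_domains := by
  intro html _
  show rewrite_legacy_domains html = rewrite_legacy_domains_alt html
  have h1 : (rewrite_legacy_domains html).toList
      = (rewrite_legacy_domains_alt html).toList := by
    rw [pvPortA_toList, rewrite_legacy_domains_alt, String.toList_ofList]
    exact pvMaster html.toList.length html.toList (le_refl _)
  calc rewrite_legacy_domains html
      = String.ofList (rewrite_legacy_domains html).toList := String.ofList_toList.symm
    _ = String.ofList (rewrite_legacy_domains_alt html).toList := by rw [h1]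
    _ = rewrite_legacy_domains_alt html := String.ofList_toList
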